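-- pv_equiv track=rewrite | github.com/johnlspouge/Euler | project_euler/al_wazir.py | doubleFactorialsOfTwice
-- ===== SOURCE A (Python) =====
-- def doubleFactorialsOfTwice(n):
--
--     n *= 2
--     n -= 1
--     doubleFactorials = []
--     i = 1
--     product = 1
--     while i < n:
--         product *= i
--         doubleFactorials.append(product)
--         i += 2
--
--     doubleFactorials.reverse()
--
--     return doubleFactorials
-- ===== SOURCE B (Python) =====
-- def doubleFactorialsOfTwice(n):
--     m = n - 1
--     if m <= 0:
--         return []
--     P = 1
--     for i in range(1, 2 * m, 2):
--         P *= i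
--     res = [P]
--     for i in range(2 * m - 1, 1, -2):
--         P //= i
--         res.append(P)
--     return res
-- ===== Notes on version B (the rewrite author's own statement) =====
-- stated objective: alternative
-- what changed: Instead of accumulating partial products forward and reversing the list, B computes the total product of the relevant odd factors once and then emits the reversed list directly by repeatedly applying exact integer division of a running quotient by the descending odd factors.
import Mathlib
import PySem

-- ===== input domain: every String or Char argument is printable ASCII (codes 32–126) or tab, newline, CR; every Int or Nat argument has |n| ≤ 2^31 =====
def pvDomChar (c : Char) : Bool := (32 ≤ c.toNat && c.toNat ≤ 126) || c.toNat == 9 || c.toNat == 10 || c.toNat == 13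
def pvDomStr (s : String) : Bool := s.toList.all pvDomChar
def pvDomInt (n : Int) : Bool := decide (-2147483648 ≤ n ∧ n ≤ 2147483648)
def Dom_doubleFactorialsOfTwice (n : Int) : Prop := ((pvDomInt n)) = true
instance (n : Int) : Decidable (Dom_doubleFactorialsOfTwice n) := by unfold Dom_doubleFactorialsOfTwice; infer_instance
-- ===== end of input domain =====

-- B computes the total product of the odd factors once, then emits the reversed list directly
-- by dividing a running quotient down through the odds (alternative decomposition, same cost).


-- ===== PORT A =====
-- A's while loop: i and product advance together, appending each partial product.
def dfLoopA (m i product : Int) (acc : List Int) : List Int :=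
  if i < m then dfLoopA m (i + 2) (product * i) (acc ++ [product * i]) else acc
termination_by (m - i).toNat
decreasing_by omega

def doubleFactorialsOfTwice (n : Int) : List Int :=
  (dfLoopA (n * 2 - 1) 1 1 []).reverse

-- ===== PORT B =====
def doubleFactorialsOfTwice_alt (n : Int) : List Int :=
  let m := n - 1
  if m ≤ 0 then []
  else
    let P := (PySem.List.pyRange 1 (2 * m) 2).foldl (fun p i => p * i) 1
    let st := (PySem.List.pyRange (2 * m - 1) 1 (-2)).foldl
      (fun (st : Int × List Int) i =>
        let q := PySem.Int.floordiv st.1 i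
        (q, st.2 ++ [q])) (P, [P])
    st.2

-- ===== PRECONDITION & SPEC =====
def Spec_doubleFactorialsOfTwice (n : Int) (out : List Int) : Prop := out = doubleFactorialsOfTwice_alt n
instance (n : Int) (out : List Int) : Decidable (Spec_doubleFactorialsOfTwice n out) := by unfold Spec_doubleFactorialsOfTwice; infer_instance

-- ===== CLAIM (what is proved, stated in full; the proofs are below) =====
def Claim_equal_doubleFactorialsOfTwice : Prop := ∀ (n : Int), Dom_doubleFactorialsOfTwice n → Spec_doubleFactorialsOfTwice n (doubleFactorialsOfTwice n)

-- ===== LEMMAS AND PROOFS =====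

-- product of the first m odd numbers 1·3·⋯·(2m-1)
def oddP : Nat → Int
  | 0 => 1
  | m + 1 => oddP m * (2 * m + 1)

-- A's loop produces the partial products in ascending order
theorem dfLoopA_char (d : Nat) : ∀ (j : Nat) (acc : List Int),
    dfLoopA (2 * ((j : Int) + (d : Int)) + 1) (2 * (j : Int) + 1) (oddP j) acc
      = acc ++ (List.range d).map (fun t : Nat => oddP (j + t + 1)) := by
  induction d with
  | zero => intro j acc; rw [dfLoopA]; simp
  | succ d ih =>
      intro j acc
      rw [dfLoopA, if_pos (by push_cast; omega)]
      have h2 : oddP j * (2 * (j : Int) + 1) = oddP (j + 1) := by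
        simp [oddP]
      have e : dfLoopA (2 * ((j : Int) + ((d + 1 : Nat) : Int)) + 1) (2 * (j : Int) + 1 + 2)
            (oddP j * (2 * (j : Int) + 1)) (acc ++ [oddP j * (2 * (j : Int) + 1)])
          = dfLoopA (2 * (((j + 1 : Nat) : Int) + (d : Int)) + 1) (2 * ((j + 1 : Nat) : Int) + 1)
            (oddP (j + 1)) (acc ++ [oddP (j + 1)]) := by
        rw [h2]; congr 1; push_cast; ring
      rw [e, ih (j + 1)]
      have h4 : ∀ t : Nat, j + 1 + t + 1 = j + (t + 1) + 1 := by omega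
      simp [List.range_succ_eq_map, List.map_map, Function.comp_def, h4]

theorem A_char (k : Nat) :
    dfLoopA (2 * (k : Int) + 1) 1 1 [] = (List.range k).map (fun t : Nat => oddP (t + 1)) := by
  have := dfLoopA_char k 0 []
  simpa [oddP] using this

-- positive odd range as a map
theorem pyRange_odds (m : Nat) :
    PySem.List.pyRange 1 (2 * (m : Int)) 2 = (List.range m).map (fun t : Nat => 1 + 2 * (t : Int)) := by
  rw [PySem.List.pyRange_of_pos _ _ (by norm_num)]
  rcases Nat.eq_zero_or_pos m with h | h
  · subst h; norm_num
  · rw [if_pos (by omega)]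
    have hc : ((2 * (m : Int) - 1 + 2 - 1) / 2) = (m : Int) := by omega
    rw [hc]
    simp

-- total product = oddP
theorem prod_odds (m : Nat) :
    ((List.range m).map (fun t : Nat => 1 + 2 * (t : Int))).foldl (fun p i => p * i) 1 = oddP m := by
  induction m with
  | zero => simp [oddP]
  | succ m ih =>
      rw [List.range_succ, List.map_append, List.foldl_append, ih]
      simp only [List.map_cons, List.map_nil, List.foldl_cons, List.foldl_nil, oddP]
      ring

-- descending odd range as a map
theorem pyRange_odds_desc (k : Nat) (hk : 1 ≤ k) :
    PySem.List.pyRange (2 * (k : Int) - 1) 1 (-2)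
      = (List.range (k - 1)).map (fun t : Nat => 2 * ((k : Int) - 1 - (t : Int)) + 1) := by
  simp only [PySem.List.pyRange]
  norm_num
  rcases Nat.lt_or_ge k 2 with h | h
  · interval_cases k
    rfl
  · rw [if_pos (by omega)]
    have hc : ((2 * (k : Int) - 1 - 1 + 2 - 1) / 2) = (k : Int) - 1 := by omega
    rw [hc]
    have hl : ((k : Int) - 1).toNat = k - 1 := by omega
    rw [hl]
    apply List.map_congr_left
    intro t _
    ring

-- the descending list of oddP values, peeled at the front
theorem desc_cons (k : Nat) :
    (List.range (k + 1)).map (fun t : Nat => oddP (k + 1 - t))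
      = oddP (k + 1) :: (List.range k).map (fun t : Nat => oddP (k - t)) := by
  rw [List.range_succ_eq_map]
  simp only [List.map_cons, List.map_map, Function.comp_def, Nat.sub_zero]
  exact congrArg _ (List.map_congr_left (fun t _ => by congr 1; omega))

-- B's dividing fold emits oddP (d-t) in descending order
theorem B_fold (d : Nat) : ∀ (acc : List Int),
    (((List.range d).map (fun t : Nat => 2 * ((d : Int) - (t : Int)) + 1)).foldl
        (fun (st : Int × List Int) i =>
          let q := PySem.Int.floordiv st.1 i
          (q, st.2 ++ [q])) (oddP (d + 1), acc)).2
      = acc ++ (List.range d).map (fun t : Nat => oddP (d - t)) := by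
  induction d with
  | zero => intro acc; simp
  | succ d ih =>
      intro acc
      have hlist : (List.range (d + 1)).map
            (fun t : Nat => 2 * (((d + 1 : Nat) : Int) - (t : Int)) + 1)
          = (2 * ((d : Int) + 1) + 1)
            :: (List.range d).map (fun t : Nat => 2 * ((d : Int) - (t : Int)) + 1) := by
        rw [List.range_succ_eq_map]
        simp only [List.map_cons, List.map_map, Function.comp_def]
        push_cast
        congr 1
        exact List.map_congr_left (fun t _ => by ring)
      have hq : PySem.Int.floordiv (oddP (d + 1 + 1)) (2 * ((d : Int) + 1) + 1)
          = oddP (d + 1) := by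
        have hstep : oddP (d + 1 + 1) = oddP (d + 1) * (2 * ((d : Int) + 1) + 1) := by
          simp only [oddP]; push_cast; ring
        rw [hstep, PySem.Int.floordiv_eq_ediv_of_pos (by omega)]
        exact Int.mul_ediv_cancel _ (by omega)
      rw [hlist]
      simp only [List.foldl_cons, hq]
      rw [ih (acc ++ [oddP (d + 1)]), desc_cons]
      simp

-- reversing A's list gives B's list
theorem rev_map (k : Nat) :
    (((List.range (k + 1)).map (fun t : Nat => oddP (t + 1)))).reverse
      = oddP (k + 1) :: (List.range k).map (fun t : Nat => oddP (k - t)) := by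
  induction k with
  | zero => simp
  | succ k ih =>
      rw [List.range_succ (n := k + 1), List.map_append, List.reverse_append]
      simp only [List.map_cons, List.map_nil, List.reverse_cons, List.reverse_nil, List.nil_append,
        List.singleton_append]
      rw [ih, ← desc_cons]

-- ===== VERDICT (by name: the statement is the Claim_ definition above) =====
theorem doubleFactorialsOfTwice_spec : Claim_equal_doubleFactorialsOfTwice := by
  intro n _
  unfold Spec_doubleFactorialsOfTwice doubleFactorialsOfTwice doubleFactorialsOfTwice_alt
  by_cases hn : n - 1 ≤ 0
  · rw [dfLoopA, if_neg (by omega)]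
    simp [hn]
  · simp only [hn, if_false]
    obtain ⟨j, hj⟩ : ∃ j : Nat, (n - 1).toNat = j + 1 := ⟨(n - 1).toNat - 1, by omega⟩
    have hm : n - 1 = ((j + 1 : Nat) : Int) := by omega
    have hA : n * 2 - 1 = 2 * (((j + 1 : Nat) : Int)) + 1 := by omega
    rw [hA, A_char (j + 1), hm]
    rw [pyRange_odds (j + 1), prod_odds (j + 1), pyRange_odds_desc (j + 1) (by omega)]
    have hmap : (List.range (j + 1 - 1)).map (fun t : Nat => 2 * (((j + 1 : Nat) : Int) - 1 - (t : Int)) + 1)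
        = (List.range j).map (fun t : Nat => 2 * ((j : Int) - (t : Int)) + 1) := by
      simp only [Nat.add_sub_cancel]
      exact List.map_congr_left (fun t _ => by push_cast; ring)
    rw [hmap, B_fold j [oddP (j + 1)], rev_map j]
    simp
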